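-- pv_equiv track=rewrite | github.com/Abhinand-p/Reinforcement-Learning-Bomberman | agent_code/novoice_agent/callbacks.py | get_opposite_direction
-- ===== SOURCE A (Python) =====
-- def get_opposite_direction(game_state, x, y):
--     """
--     Get the opposite direction of the nearest explosion relative to the agent's position.
--
--     Args:
--         game_state: The current game state.
--         x: X-coordinate of the agent's position.
--         y: Y-coordinate of the agent's position.
--
--     Returns:
--         The opposite direction (e.g., "UP" if the nearest explosion is "DOWN").
--         Returns None if no explosion is nearby.
--     """
--     nearest_explosion_direction = None
--     nearest_explosion_distance = float('inf')
--
--     # Iterate through explosion locations and find the nearest one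
--     for explosion in game_state['explosion_map']:
--         for ex_x, ex_y in explosion:
--             distance = abs(x - ex_x) + abs(y - ex_y)
--             if distance < nearest_explosion_distance:
--                 nearest_explosion_distance = distance
--                 # Determine the direction of the nearest explosion
--                 if ex_x > x:
--                     nearest_explosion_direction = "RIGHT"
--                 elif ex_x < x:
--                     nearest_explosion_direction = "LEFT"
--                 elif ex_y > y:
--                     nearest_explosion_direction = "DOWN"
--                 elif ex_y < y:
--                     nearest_explosion_direction = "UP"
--
--     # Return the opposite direction if a nearest explosion was found
--     if nearest_explosion_direction:
--         opposite_directions = {"UP": "DOWN", "DOWN": "UP", "LEFT": "RIGHT", "RIGHT": "LEFT"}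
--         return opposite_directions[nearest_explosion_direction]
--
--     # Return None if no explosion is nearby
--     return None
-- ===== SOURCE B (Python) =====
-- def get_opposite_direction(game_state, x, y):
--     """Staged passes: tag every explosion cell with its Manhattan distance,
--     take the minimal distance, locate the first cell at that distance, and
--     read the escape direction off the coordinate deltas (no direction labels,
--     no flip table)."""
--     tagged = [(abs(x - ex) + abs(y - ey), ex, ey)
--               for explosion in game_state['explosion_map']
--               for ex, ey in explosion]
--     if not tagged:
--         return None
--     dmin = min(d for d, _, _ in tagged)
--     _, ex, ey = next(t for t in tagged if t[0] == dmin)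
--     dx, dy = ex - x, ey - y
--     if dx:
--         return "LEFT" if dx > 0 else "RIGHT"
--     if dy:
--         return "UP" if dy > 0 else "DOWN"
--     return None
-- ===== Notes on version B (the rewrite author's own statement) =====
-- stated objective: alternative
-- what changed: Replaces A's single scan with a running (direction,best-distance) accumulator and a flip table by staged passes: tag cells with distances, take the minimal distance, find the first cell at that distance, and derive the opposite direction arithmetically from the coordinate deltas.
-- intended difference: When the agent's own cell (x,y) occurs among the explosion cells but is not the first cell, A returns the opposite direction left over from a farther cell seen earlier (stale loop state), while B returns None because the nearest explosion is the agent's own cell and has no direction; None is the intended value for a distance-0 explosion. — e.g. on get_opposite_direction([("explosion_map", [[(1, 0), (0, 0)]])], 0, 0): A returns some "LEFT", B returns none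
import Mathlib
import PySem

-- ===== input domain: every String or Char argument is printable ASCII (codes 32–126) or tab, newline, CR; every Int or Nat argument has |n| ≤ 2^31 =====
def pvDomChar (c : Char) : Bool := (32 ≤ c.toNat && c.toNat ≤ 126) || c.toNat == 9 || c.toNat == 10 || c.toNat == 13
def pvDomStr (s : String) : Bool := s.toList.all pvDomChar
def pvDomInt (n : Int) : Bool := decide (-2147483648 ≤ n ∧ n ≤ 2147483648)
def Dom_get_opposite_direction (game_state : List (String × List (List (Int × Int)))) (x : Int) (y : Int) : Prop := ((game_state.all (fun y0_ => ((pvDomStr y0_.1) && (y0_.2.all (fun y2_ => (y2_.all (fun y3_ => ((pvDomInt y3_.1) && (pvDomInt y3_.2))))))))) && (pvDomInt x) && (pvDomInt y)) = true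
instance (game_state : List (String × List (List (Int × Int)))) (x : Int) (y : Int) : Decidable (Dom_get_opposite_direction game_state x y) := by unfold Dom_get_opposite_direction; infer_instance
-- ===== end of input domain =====

-- B replaces A's running (direction, best-distance) accumulator and flip table by staged
-- passes: tag cells with distances, take the minimal distance, find the first cell at that
-- distance, and derive the opposite direction from the coordinate deltas.

-- ===== PORT A =====
-- one iteration of A's inner loop body: state = (nearest_explosion_direction, nearest_explosion_distance (none = inf))
def pvStepA (x y : Int) (st : Option String × Option Int) (c : Int × Int) : Option String × Option Int :=
  let d : Int := |x - c.1| + |y - c.2|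
  if (match st.2 with | none => true | some b => decide (d < b)) then
    ((if c.1 > x then some "RIGHT"
      else if c.1 < x then some "LEFT"
      else if c.2 > y then some "DOWN"
      else if c.2 < y then some "UP"
      else st.1), some d)
  else st

def get_opposite_direction (game_state : List (String × List (List (Int × Int)))) (x : Int) (y : Int) : Option String :=
  match PySem.Dict.get? (PySem.Dict.mk game_state) "explosion_map" with
  | none => none   -- KeyError in Python; excluded by Pre_
  | some emap =>
    let st := emap.foldl (fun st explosion => explosion.foldl (pvStepA x y) st) (none, none)
    match st.1 with
    | some dir =>
      PySem.Dict.get? (PySem.Dict.mk [("UP", "DOWN"), ("DOWN", "UP"), ("LEFT", "RIGHT"), ("RIGHT", "LEFT")]) dir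
    | none => none

-- ===== PORT B =====
-- (d, ex, ey) triple of Source B's comprehension
def pvTag (x y : Int) (c : Int × Int) : Int × Int × Int := (|x - c.1| + |y - c.2|, c.1, c.2)

def get_opposite_direction_alt (game_state : List (String × List (List (Int × Int)))) (x : Int) (y : Int) : Option String :=
  match PySem.Dict.get? (PySem.Dict.mk game_state) "explosion_map" with
  | none => none   -- KeyError in Python; excluded by Pre_
  | some emap =>
    let tagged := emap.flatMap (fun explosion => explosion.map (pvTag x y))
    match PySem.List.min? (tagged.map (fun t => t.1)) (fun d => d) with
    | none => none   -- 'if not tagged: return None' (min? is none exactly on the empty list)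
    | some dmin =>
      match tagged.find? (fun t => t.1 == dmin) with
      | none => none   -- unreachable: dmin is one of the tagged distances
      | some t =>
        let dx := t.2.1 - x
        let dy := t.2.2 - y
        if dx ≠ 0 then (if dx > 0 then some "LEFT" else some "RIGHT")
        else if dy ≠ 0 then (if dy > 0 then some "UP" else some "DOWN")
        else none

-- ===== PRECONDITION & SPEC =====
-- Pre_ excludes exactly the game states without an 'explosion_map' key, on which Python A raises KeyError.
def Pre_get_opposite_direction (game_state : List (String × List (List (Int × Int)))) (x : Int) (y : Int) : Prop :=
  (PySem.Dict.contains (PySem.Dict.mk game_state) "explosion_map") = true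
instance (game_state : List (String × List (List (Int × Int)))) (x : Int) (y : Int) : Decidable (Pre_get_opposite_direction game_state x y) := by unfold Pre_get_opposite_direction; infer_instance
def pvWitness_get_opposite_direction : (List (String × List (List (Int × Int)))) × Int × Int :=
  ([("explosion_map", [[(1, 0), (0, 2)]])], 0, 0)

-- When the agent's own cell (x,y) occurs among the explosion cells but is not the first cell,
-- A returns the opposite direction left over from a farther cell seen earlier (stale loop state),
-- while B returns None because the nearest explosion is the agent's own cell, which has no direction;
-- None is the intended value for a distance-0 explosion.
def D_get_opposite_direction (game_state : List (String × List (List (Int × Int)))) (x : Int) (y : Int) : Prop :=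
  (match PySem.Dict.get? (PySem.Dict.mk game_state) "explosion_map" with
   | none => false
   | some emap =>
     decide ((x, y) ∈ emap.flatten) && decide (emap.flatten.head? ≠ some (x, y))) = true
instance (game_state : List (String × List (List (Int × Int)))) (x : Int) (y : Int) : Decidable (D_get_opposite_direction game_state x y) := by unfold D_get_opposite_direction; infer_instance

def Spec_get_opposite_direction (game_state : List (String × List (List (Int × Int)))) (x : Int) (y : Int) (out : Option String) : Prop := ¬ D_get_opposite_direction game_state x y → out = get_opposite_direction_alt game_state x y
instance (game_state : List (String × List (List (Int × Int)))) (x : Int) (y : Int) (out : Option String) : Decidable (Spec_get_opposite_direction game_state x y out) := by unfold Spec_get_opposite_direction; infer_instance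

def pvDiffWitness_get_opposite_direction : (List (String × List (List (Int × Int)))) × Int × Int :=
  ([("explosion_map", [[(1, 0), (0, 0)]])], 0, 0)
def pvDiffWitnessOut_get_opposite_direction : (Option String) × (Option String) := (some "LEFT", none)

-- ===== CLAIM (what is proved, stated in full; the proofs are below) =====
def Claim_unchanged_get_opposite_direction : Prop := ∀ (game_state : List (String × List (List (Int × Int)))) (x : Int) (y : Int), Dom_get_opposite_direction game_state x y → Pre_get_opposite_direction game_state x y → Spec_get_opposite_direction game_state x y (get_opposite_direction game_state x y)
def Claim_changed_get_opposite_direction : Prop := Dom_get_opposite_direction (pvDiffWitness_get_opposite_direction.1) (pvDiffWitness_get_opposite_direction.2.1) (pvDiffWitness_get_opposite_direction.2.2) ∧ Pre_get_opposite_direction (pvDiffWitness_get_opposite_direction.1) (pvDiffWitness_get_opposite_direction.2.1) (pvDiffWitness_get_opposite_direction.2.2) ∧ D_get_opposite_direction (pvDiffWitness_get_opposite_direction.1) (pvDiffWitness_get_opposite_direction.2.1) (pvDiffWitness_get_opposite_direction.2.2) ∧ get_opposite_direction (pvDiffWitness_get_opposite_direction.1) (pvDiffWitness_get_opposite_direction.2.1)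 (pvDiffWitness_get_opposite_direction.2.2) = pvDiffWitnessOut_get_opposite_direction.1 ∧ get_opposite_direction_alt (pvDiffWitness_get_opposite_direction.1) (pvDiffWitness_get_opposite_direction.2.1) (pvDiffWitness_get_opposite_direction.2.2) = pvDiffWitnessOut_get_opposite_direction.2 ∧ pvDiffWitnessOut_get_opposite_direction.1 ≠ pvDiffWitnessOut_get_opposite_direction.2
def Claim_exact_get_opposite_direction : Prop := ∀ (game_state : List (String × List (List (Int × Int)))) (x : Int) (y : Int), Dom_get_opposite_direction game_state x y → Pre_get_opposite_direction game_state x y → D_get_opposite_direction game_state x y → get_opposite_direction game_state x y ≠ get_opposite_direction_alt game_state x y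

-- ===== LEMMAS AND PROOFS =====

def pvDist (x y : Int) (c : Int × Int) : Int := |x - c.1| + |y - c.2|

def pvDirOf (x y : Int) (c : Int × Int) : String :=
  if c.1 > x then "RIGHT" else if c.1 < x then "LEFT" else if c.2 > y then "DOWN" else "UP"

def pvStepM (x y : Int) (acc : Option (Int × Int)) (c : Int × Int) : Option (Int × Int) :=
  match acc with
  | none => some c
  | some m => if pvDist x y c < pvDist x y m then some c else some m

theorem pvStepM_some (x y : Int) (m c : Int × Int) :
    pvStepM x y (some m) c = if pvDist x y c < pvDist x y m then some c else some m := rfl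

theorem pvStepA_none (x y : Int) (d0 : Option String) (c : Int × Int) :
    pvStepA x y (d0, none) c
      = ((if c.1 > x then some "RIGHT" else if c.1 < x then some "LEFT"
          else if c.2 > y then some "DOWN" else if c.2 < y then some "UP" else d0),
         some (pvDist x y c)) := rfl

theorem pvStepA_some (x y : Int) (d0 : Option String) (b : Int) (c : Int × Int) :
    pvStepA x y (d0, some b) c
      = if pvDist x y c < b then
          ((if c.1 > x then some "RIGHT" else if c.1 < x then some "LEFT"
            else if c.2 > y then some "DOWN" else if c.2 < y then some "UP" else d0),
           some (pvDist x y c))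
        else (d0, some b) := by
  by_cases h : pvDist x y c < b
  · rw [if_pos h]; unfold pvStepA; rw [if_pos (by simpa [pvDist] using h)]; rfl
  · rw [if_neg h]; unfold pvStepA; rw [if_neg (by simpa [pvDist] using h)]

theorem pvDist_nonneg (x y : Int) (c : Int × Int) : 0 ≤ pvDist x y c :=
  add_nonneg (abs_nonneg _) (abs_nonneg _)

theorem pvDist_self (x y : Int) : pvDist x y (x, y) = 0 := by simp [pvDist]

theorem pvDist_pos (x y : Int) (c : Int × Int) (h : c ≠ (x, y)) : 0 < pvDist x y c := by
  obtain ⟨a, b⟩ := c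
  simp only [ne_eq, Prod.mk.injEq, not_and] at h
  show (0:Int) < |x - a| + |y - b|
  rcases eq_or_ne a x with ha | ha
  · have hb : y - b ≠ 0 := by have := h ha; omega
    have h1 := abs_pos.mpr hb
    have h2 := abs_nonneg (x - a)
    linarith
  · have h1 := abs_pos.mpr (show x - a ≠ 0 by omega)
    have h2 := abs_nonneg (y - b)
    linarith

-- A's classification of an improving cell c ≠ (x,y) is some (pvDirOf x y c), whatever the old direction z
theorem pvClassifyA_eq (x y : Int) (c : Int × Int) (hc : c ≠ (x, y)) (z : Option String) :
    (if c.1 > x then some "RIGHT" else if c.1 < x then some "LEFT"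
     else if c.2 > y then some "DOWN" else if c.2 < y then some "UP" else z)
      = some (pvDirOf x y c) := by
  obtain ⟨a, b⟩ := c
  simp only [ne_eq, Prod.mk.injEq, not_and] at hc
  unfold pvDirOf
  split_ifs <;> first | rfl | (exfalso; omega)

theorem pvDirOf_cases (x y : Int) (c : Int × Int) :
    pvDirOf x y c = "RIGHT" ∨ pvDirOf x y c = "LEFT" ∨ pvDirOf x y c = "DOWN" ∨ pvDirOf x y c = "UP" := by
  unfold pvDirOf; split_ifs <;> simp

-- once the best distance is 0, A's loop never updates again
theorem pvFoldA_zero (x y : Int) (cells : List (Int × Int)) (d0 : Option String) :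
    cells.foldl (pvStepA x y) (d0, some 0) = (d0, some 0) := by
  induction cells with
  | nil => rfl
  | cons c rest ih =>
    rw [List.foldl_cons, pvStepA_some, if_neg (by have := pvDist_nonneg x y c; omega)]
    exact ih

-- the two loops run in lockstep as long as (x,y) never appears
theorem pvLockstep (x y : Int) (cells : List (Int × Int)) :
    ∀ m : Int × Int, (x, y) ∉ cells → m ≠ (x, y) →
    ∃ m', cells.foldl (pvStepM x y) (some m) = some m' ∧ m' ≠ (x, y) ∧
      cells.foldl (pvStepA x y) (some (pvDirOf x y m), some (pvDist x y m))
        = (some (pvDirOf x y m'), some (pvDist x y m')) := by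
  induction cells with
  | nil => exact fun m _ hm => ⟨m, rfl, hm, rfl⟩
  | cons c rest ih =>
    intro m hmem hm
    have hc : c ≠ (x, y) := by intro h; exact hmem (by simp [h])
    have hrest : (x, y) ∉ rest := fun h => hmem (List.mem_cons_of_mem _ h)
    rw [List.foldl_cons, List.foldl_cons, pvStepM_some, pvStepA_some]
    by_cases hlt : pvDist x y c < pvDist x y m
    · rw [if_pos hlt, if_pos hlt, pvClassifyA_eq x y c hc]
      exact ih c hrest hc
    · rw [if_neg hlt, if_neg hlt]
      exact ih m hrest hm

-- characterization of A's first-minimizer fold: the result is minimal, a member, and is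
-- found by scanning for the first cell at the minimal distance
theorem pvFoldM_char (x y : Int) (cells : List (Int × Int)) :
    ∀ m m' : Int × Int, cells.foldl (pvStepM x y) (some m) = some m' →
      pvDist x y m' ≤ pvDist x y m ∧ (m' = m ∨ m' ∈ cells) ∧
      (∀ c ∈ cells, pvDist x y m' ≤ pvDist x y c) ∧
      (if pvDist x y m' = pvDist x y m then m' = m
       else cells.find? (fun c => pvDist x y c == pvDist x y m') = some m') := by
  induction cells with
  | nil =>
    intro m m' h
    simp only [List.foldl_nil, Option.some.injEq] at h
    subst h
    refine ⟨le_refl _, Or.inl rfl, by simp, by simp⟩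
  | cons c rest ih =>
    intro m m' h
    rw [List.foldl_cons, pvStepM_some] at h
    by_cases hlt : pvDist x y c < pvDist x y m
    · rw [if_pos hlt] at h
      obtain ⟨h1, h2, h3, h4⟩ := ih c m' h
      refine ⟨by omega, ?_, ?_, ?_⟩
      · rcases h2 with h2 | h2
        · exact Or.inr (by simp [h2])
        · exact Or.inr (List.mem_cons_of_mem _ h2)
      · intro c' hc'
        rcases List.mem_cons.mp hc' with h' | h'
        · subst h'; exact h1
        · exact h3 c' h'
      · rw [if_neg (by omega)]
        by_cases heq : pvDist x y m' = pvDist x y c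
        · rw [if_pos heq] at h4; subst h4
          simp [List.find?_cons, heq]
        · rw [if_neg heq] at h4
          rw [List.find?_cons_of_neg (by simp; omega)]
          exact h4
    · rw [if_neg hlt] at h
      obtain ⟨h1, h2, h3, h4⟩ := ih m m' h
      refine ⟨h1, ?_, ?_, ?_⟩
      · rcases h2 with h2 | h2
        · exact Or.inl h2
        · exact Or.inr (List.mem_cons_of_mem _ h2)
      · intro c' hc'
        rcases List.mem_cons.mp hc' with h' | h'
        · subst h'; omega
        · exact h3 c' h'
      · by_cases heq : pvDist x y m' = pvDist x y m
        · rw [if_pos heq]; rw [if_pos heq] at h4; exact h4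
        · rw [if_neg heq]; rw [if_neg heq] at h4
          rw [List.find?_cons_of_neg (by simp; omega)]
          exact h4

-- the first cell at distance 0 is the agent's own cell
theorem pvFindZero (x y : Int) (cells : List (Int × Int)) (h : (x, y) ∈ cells) :
    cells.find? (fun c => pvDist x y c == (0:Int)) = some (x, y) := by
  induction cells with
  | nil => exact absurd h List.not_mem_nil
  | cons c rest ih =>
    by_cases hc : c = (x, y)
    · subst hc
      rw [List.find?_cons_of_pos (by simp [pvDist_self])]
    · have := pvDist_pos x y c hc
      rw [List.find?_cons_of_neg (by simp; omega)]
      exact ih ((List.mem_cons.mp h).resolve_left (fun h' => hc h'.symm))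

-- once A's direction is one of the four labels it stays one of the four labels
def pvGoodDir (st : Option String × Option Int) : Prop :=
  ∃ s, st.1 = some s ∧ (s = "RIGHT" ∨ s = "LEFT" ∨ s = "DOWN" ∨ s = "UP")

theorem pvFoldA_good (x y : Int) (cells : List (Int × Int)) :
    ∀ st, pvGoodDir st → pvGoodDir (cells.foldl (pvStepA x y) st) := by
  induction cells with
  | nil => exact fun st h => h
  | cons c rest ih =>
    intro ⟨d0, b⟩ hst
    rw [List.foldl_cons]
    apply ih
    cases b with
    | none =>
      rw [pvStepA_none]
      split_ifs <;> first | exact ⟨_, rfl, by simp⟩ | exact hst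
    | some b =>
      rw [pvStepA_some]
      split_ifs <;> first | exact ⟨_, rfl, by simp⟩ | exact hst

-- the double loop over the explosion map is the loop over the flattened cells
theorem pvFoldA_flatten (x y : Int) (emap : List (List (Int × Int))) (st : Option String × Option Int) :
    emap.foldl (fun st explosion => explosion.foldl (pvStepA x y) st) st
      = emap.flatten.foldl (pvStepA x y) st := (List.foldl_flatten ..).symm

-- B's tagged comprehension is the tagging of the flattened cells
theorem pvTagged_flatten (x y : Int) (emap : List (List (Int × Int))) :
    emap.flatMap (fun explosion => explosion.map (pvTag x y)) = emap.flatten.map (pvTag x y) := by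
  simp [List.flatMap_def, List.map_flatten]

theorem pvTag_fst (x y : Int) : (fun t => t.1) ∘ pvTag x y = pvDist x y := rfl

-- the opposite-direction table applied to A's direction equals B's delta classification
theorem pvOppB (x y : Int) (m : Int × Int) (hm : m ≠ (x, y)) :
    PySem.Dict.get? (PySem.Dict.mk [("UP", "DOWN"), ("DOWN", "UP"), ("LEFT", "RIGHT"), ("RIGHT", "LEFT")]) (pvDirOf x y m)
      = (if (pvTag x y m).2.1 - x ≠ 0 then (if (pvTag x y m).2.1 - x > 0 then some "LEFT" else some "RIGHT")
         else if (pvTag x y m).2.2 - y ≠ 0 then (if (pvTag x y m).2.2 - y > 0 then some "UP" else some "DOWN")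
         else none) := by
  obtain ⟨a, b⟩ := m
  simp only [ne_eq, Prod.mk.injEq, not_and] at hm
  unfold pvDirOf pvTag
  dsimp only
  split_ifs <;> first | rfl | (exfalso; omega)

-- ===== VERDICT (by name: the statement is the Claim_ definition above) =====
theorem get_opposite_direction_spec : Claim_unchanged_get_opposite_direction := by
  intro gs x y _ _ hnd
  unfold get_opposite_direction get_opposite_direction_alt
  unfold D_get_opposite_direction at hnd
  cases hget : PySem.Dict.get? (PySem.Dict.mk gs) "explosion_map" with
  | none => rfl
  | some emap =>
    rw [hget] at hnd
    dsimp only at hnd ⊢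
    rw [pvFoldA_flatten, pvTagged_flatten]
    simp only [Bool.and_eq_true, decide_eq_true_eq, not_and, not_not] at hnd
    cases hflat : emap.flatten with
    | nil => simp [PySem.List.min?]
    | cons c rest =>
      rw [hflat] at hnd
      rw [List.map_cons, List.foldl_cons, pvStepA_none]
      have hmap : ((pvTag x y c :: rest.map (pvTag x y)).map (fun t => t.1))
          = pvDist x y c :: rest.map (pvDist x y) := by
        simp [List.map_map, pvTag_fst]; rfl
      by_cases hc : c = (x, y)
      · -- head is the agent's cell: A stays direction-less, B finds distance 0 at the head
        subst hc
        rw [pvDist_self, pvFoldA_zero]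
        have hnone : (if (x, y).1 > x then some "RIGHT" else if (x, y).1 < x then some "LEFT"
            else if (x, y).2 > y then some "DOWN" else if (x, y).2 < y then some "UP"
            else (none : Option String)) = none := by simp
        simp only [hnone]
        cases hmin : PySem.List.min? ((pvTag x y (x, y) :: rest.map (pvTag x y)).map (fun t => t.1)) (fun d => d) with
        | none => rfl
        | some dmin =>
          have hd0 : dmin = 0 := by
            have hmem := PySem.List.min?_mem hmin
            have hle := PySem.List.min?_isMin hmin ((pvTag x y (x, y)).1)
              (List.mem_map_of_mem (List.mem_cons_self ..))
            rw [hmap] at hmem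
            have hle0 : dmin ≤ 0 := by simpa [pvTag] using hle
            rcases List.mem_cons.mp hmem with h' | h'
            · rw [pvDist_self] at h'; exact h'
            · obtain ⟨c', _, hc'⟩ := List.mem_map.mp h'
              have := pvDist_nonneg x y c'
              omega
          subst hd0
          simp only [hmin]
          rw [List.find?_cons_of_pos (by simp [pvTag])]
          simp [pvTag]
      · have hmem : (x, y) ∉ c :: rest := by
          intro hm
          exact hc (Option.some_injective _ (hnd hm))
        have hrest : (x, y) ∉ rest := fun h => hmem (List.mem_cons_of_mem _ h)
        rw [pvClassifyA_eq x y c hc]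
        obtain ⟨m', hM, hm', hA⟩ := pvLockstep x y rest c hrest hc
        rw [hA]
        obtain ⟨h1, h2, h3, h4⟩ := pvFoldM_char x y rest c m' hM
        -- min? returns exactly pvDist x y m'
        cases hmin : PySem.List.min? ((pvTag x y c :: rest.map (pvTag x y)).map (fun t => t.1)) (fun d => d) with
        | none =>
          rw [PySem.List.min?_eq_none_iff] at hmin
          simp at hmin
        | some dmin =>
          have hdmin : dmin = pvDist x y m' := by
            have hmemd := PySem.List.min?_mem hmin
            rw [hmap] at hmemd
            have hup : pvDist x y m' ≤ dmin := by
              rcases List.mem_cons.mp hmemd with h' | h'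
              · omega
              · obtain ⟨c', hc'm, hc'⟩ := List.mem_map.mp h'
                have := h3 c' hc'm
                omega
            have hdown : dmin ≤ pvDist x y m' := by
              rcases h2 with h2 | h2
              · have := PySem.List.min?_isMin hmin ((pvTag x y c).1)
                  (List.mem_map_of_mem (List.mem_cons_self ..))
                rw [h2]
                simpa [pvTag] using this
              · have := PySem.List.min?_isMin hmin ((pvTag x y m').1)
                  (List.mem_map_of_mem (List.mem_cons_of_mem _ (List.mem_map_of_mem h2)))
                simpa [pvTag] using this
            omega
          subst hdmin
          -- find? over the tagged list locates pvTag of m'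
          have hfind : (pvTag x y c :: rest.map (pvTag x y)).find?
              (fun t => t.1 == pvDist x y m') = some (pvTag x y m') := by
            by_cases heq : pvDist x y m' = pvDist x y c
            · rw [if_pos heq] at h4
              rw [h4, List.find?_cons_of_pos (by simp [pvTag, pvDist])]
            · rw [if_neg heq] at h4
              rw [List.find?_cons_of_neg (by
                have h1 : (pvTag x y c).1 = pvDist x y c := rfl
                simp only [h1, beq_iff_eq]
                omega)]
              rw [List.find?_map]
              have : ((fun t => t.1 == pvDist x y m') ∘ pvTag x y)
                  = (fun c => pvDist x y c == pvDist x y m') := rfl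
              rw [this, h4]
              rfl
          simp only [hfind]
          exact pvOppB x y m' hm'

theorem get_opposite_direction_changed : Claim_changed_get_opposite_direction := by
  unfold Claim_changed_get_opposite_direction; decide

theorem get_opposite_direction_tight : Claim_exact_get_opposite_direction := by
  intro gs x y _ _ hd
  unfold D_get_opposite_direction at hd
  unfold get_opposite_direction get_opposite_direction_alt
  cases hget : PySem.Dict.get? (PySem.Dict.mk gs) "explosion_map" with
  | none => rw [hget] at hd; exact absurd hd (by simp)
  | some emap =>
    rw [hget] at hd
    simp only [Bool.and_eq_true, decide_eq_true_eq] at hd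
    obtain ⟨hmem, hhead⟩ := hd
    dsimp only
    rw [pvFoldA_flatten, pvTagged_flatten]
    cases hflat : emap.flatten with
    | nil => rw [hflat] at hmem; exact absurd hmem List.not_mem_nil
    | cons c rest =>
      rw [hflat] at hmem hhead
      have hc : c ≠ (x, y) := by
        intro h; exact hhead (by rw [h]; rfl)
      rw [List.map_cons, List.foldl_cons, pvStepA_none, pvClassifyA_eq x y c hc]
      -- A's side returns some label
      have hg := pvFoldA_good x y rest (some (pvDirOf x y c), some (pvDist x y c))
        ⟨pvDirOf x y c, rfl, pvDirOf_cases x y c⟩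
      obtain ⟨s, hs, hcases⟩ := hg
      rw [hs]
      -- B's side returns none: dmin = 0 and the first cell at distance 0 is (x,y)
      have hmap : ((pvTag x y c :: rest.map (pvTag x y)).map (fun t => t.1))
          = pvDist x y c :: rest.map (pvDist x y) := by
        simp [List.map_map, pvTag_fst]; rfl
      cases hmin : PySem.List.min? ((pvTag x y c :: rest.map (pvTag x y)).map (fun t => t.1)) (fun d => d) with
      | none =>
        rw [PySem.List.min?_eq_none_iff] at hmin
        simp at hmin
      | some dmin =>
        have hd0 : dmin = 0 := by
          have hmemd := PySem.List.min?_mem hmin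
          have hxy : (pvTag x y (x, y)).1 ∈ ((pvTag x y c :: rest.map (pvTag x y)).map (fun t => t.1)) := by
            apply List.mem_map_of_mem
            rcases List.mem_cons.mp hmem with h' | h'
            · exact absurd h'.symm hc
            · exact List.mem_cons_of_mem _ (List.mem_map_of_mem h')
          have hle := PySem.List.min?_isMin hmin _ hxy
          have hle0 : dmin ≤ 0 := by simpa [pvTag, pvDist_self] using hle
          rw [hmap] at hmemd
          rcases List.mem_cons.mp hmemd with h' | h'
          · have := pvDist_nonneg x y c; omega
          · obtain ⟨c', _, hc'⟩ := List.mem_map.mp h'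
            have := pvDist_nonneg x y c'
            omega
        subst hd0
        have hfind : (pvTag x y c :: rest.map (pvTag x y)).find? (fun t => t.1 == (0:Int))
            = some (pvTag x y (x, y)) := by
          have h0 := pvDist_pos x y c hc
          rw [List.find?_cons_of_neg (by
            have h1 : (pvTag x y c).1 = pvDist x y c := rfl
            simp only [h1, beq_iff_eq]
            omega)]
          rw [List.find?_map]
          have : ((fun t => t.1 == (0:Int)) ∘ pvTag x y) = (fun c => pvDist x y c == (0:Int)) := rfl
          rw [this]
          have hrest : (x, y) ∈ rest := by
            rcases List.mem_cons.mp hmem with h' | h'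
            · exact absurd h'.symm hc
            · exact h'
          rw [pvFindZero x y rest hrest]
          rfl
        simp only [hfind]
        rcases hcases with h | h | h | h <;> subst h <;> simp [pvTag, PySem.Dict.get?]
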